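-- pv_equiv track=rewrite | github.com/fractalyze/fractal-lint | fractal_commit_lint.py | parse_commit_message
-- ===== SOURCE A (Python) =====
-- SCISSORS = "# --- >8 ---"
--
-- def parse_commit_message(text: str) -> list[str]:
--     """Strip comment lines and scissors, return remaining lines."""
--     lines = []
--     for raw_line in text.splitlines():
--         if raw_line.strip() == SCISSORS:
--             break
--         if raw_line.startswith("#"):
--             continue
--         lines.append(raw_line)
--     # Strip trailing blank lines.
--     while lines and lines[-1].strip() == "":
--         lines.pop()
--     return lines
-- ===== SOURCE B (Python) =====
-- SCISSORS = "# --- >8 ---"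
--
-- def parse_commit_message(text: str) -> list[str]:
--     """Three separate passes: cut at scissors, filter comments, slice off trailing blanks."""
--     lines = text.splitlines()
--     cut = next((i for i, line in enumerate(lines) if line.strip() == SCISSORS), len(lines))
--     kept = [line for line in lines[:cut] if not line.startswith("#")]
--     end = len(kept)
--     while end > 0 and kept[end - 1].strip() == "":
--         end -= 1
--     return kept[:end]
-- ===== Notes on version B (the rewrite author's own statement) =====
-- stated objective: alternative
-- what changed: A's single fused loop with break/continue plus a trailing pop-while is replaced by three separate passes: find the scissors cut index and slice, filter comment lines with a comprehension, then compute the last non-blank index and slice off trailing blanks.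
import Mathlib
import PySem

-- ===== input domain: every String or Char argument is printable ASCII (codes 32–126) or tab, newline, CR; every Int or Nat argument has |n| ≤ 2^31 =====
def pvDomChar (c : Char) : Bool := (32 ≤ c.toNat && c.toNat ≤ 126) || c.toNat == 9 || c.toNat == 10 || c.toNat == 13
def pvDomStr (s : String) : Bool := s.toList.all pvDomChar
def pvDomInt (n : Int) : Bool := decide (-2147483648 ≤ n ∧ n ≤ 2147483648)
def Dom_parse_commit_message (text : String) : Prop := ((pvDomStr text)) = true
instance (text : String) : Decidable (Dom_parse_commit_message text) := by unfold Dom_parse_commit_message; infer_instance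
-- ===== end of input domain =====

-- B replaces A's fused break/continue loop and pop-while by three separate passes (cut index + slice, filter, trailing-blank index + slice); objective: alternative decomposition.

-- ===== PORT A =====
-- A's for-loop with break/continue, carried accumulator `lines`
def pvALoop (acc : List String) : List String → List String
  | [] => acc
  | l :: rest =>
    if PySem.Str.strip l == "# --- >8 ---" then acc
    else if PySem.Str.startswith l "#" then pvALoop acc rest
    else pvALoop (acc ++ [l]) rest

-- A's `while lines and lines[-1].strip() == "": lines.pop()`
def pvATrim (ls : List String) : List String :=
  if h0 : ls ≠ [] ∧ PySem.Str.strip (ls.getD (ls.length - 1) "") == "" then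
    pvATrim ls.dropLast
  else ls
termination_by ls.length
decreasing_by
  have h1 : ls ≠ [] := h0.1
  have h2 : 0 < ls.length := List.length_pos_iff.mpr h1
  simp [List.length_dropLast]
  omega

def parse_commit_message (text : String) : List String :=
  pvATrim (pvALoop [] (PySem.Str.splitlines text))

-- ===== PORT B =====
-- B's `while end > 0 and kept[end-1].strip() == "": end -= 1`
def pvBEnd (kept : List String) : Nat → Nat
  | 0 => 0
  | n + 1 => if PySem.Str.strip (kept.getD n "") == "" then pvBEnd kept n else n + 1

def parse_commit_message_alt (text : String) : List String :=
  let lines := PySem.Str.splitlines text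
  let cut := (lines.findIdx? (fun line => PySem.Str.strip line == "# --- >8 ---")).getD lines.length
  let kept := (lines.take cut).filter (fun line => !(PySem.Str.startswith line "#"))
  kept.take (pvBEnd kept kept.length)

-- ===== PRECONDITION & SPEC =====
def Spec_parse_commit_message (text : String) (out : List String) : Prop := out = parse_commit_message_alt text
instance (text : String) (out : List String) : Decidable (Spec_parse_commit_message text out) := by unfold Spec_parse_commit_message; infer_instance

-- ===== CLAIM (what is proved, stated in full; the proofs are below) =====
def Claim_equal_parse_commit_message : Prop := ∀ (text : String), Dom_parse_commit_message text → Spec_parse_commit_message text (parse_commit_message text)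

-- ===== LEMMAS AND PROOFS =====

theorem pvALoop_eq (ls : List String) : ∀ acc, pvALoop acc ls =
    acc ++ (ls.take ((ls.findIdx? (fun line => PySem.Str.strip line == "# --- >8 ---")).getD ls.length)).filter
      (fun line => !(PySem.Str.startswith line "#")) := by
  induction ls with
  | nil => intro acc; simp [pvALoop]
  | cons l rest ih =>
    intro acc
    by_cases hs : PySem.Str.strip l == "# --- >8 ---"
    · simp [pvALoop, hs, List.findIdx?_cons]
    · have hcut : ((l :: rest).findIdx? (fun line => PySem.Str.strip line == "# --- >8 ---")).getD (l :: rest).length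
          = ((rest.findIdx? (fun line => PySem.Str.strip line == "# --- >8 ---")).getD rest.length) + 1 := by
        rw [List.findIdx?_cons]
        simp only [hs]
        cases rest.findIdx? (fun line => PySem.Str.strip line == "# --- >8 ---") <;> simp
      simp only [pvALoop]
      rw [if_neg hs, hcut, List.take_succ_cons, List.filter_cons]
      by_cases hh : PySem.Str.startswith l "#" = true
      · rw [if_pos hh, ih]
        simp at hh
        simp [hh]
      · rw [if_neg hh, ih]
        simp at hh
        simp [hh]

theorem pvBEnd_le (kept : List String) : ∀ n, pvBEnd kept n ≤ n := by
  intro n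
  induction n with
  | zero => simp [pvBEnd]
  | succ m ih =>
    rw [pvBEnd]
    split
    · omega
    · omega

theorem pvBEnd_append (ys : List String) (y : String) :
    ∀ n, n ≤ ys.length → pvBEnd (ys ++ [y]) n = pvBEnd ys n := by
  intro n
  induction n with
  | zero => intro _; simp [pvBEnd]
  | succ m ih =>
    intro h
    have hm : m < ys.length := by omega
    have hg : (ys ++ [y]).getD m "" = ys.getD m "" := by
      simp [List.getD, List.getElem?_append_left hm]
    rw [pvBEnd, pvBEnd, hg, ih (by omega)]

theorem pvATrim_eq (ls : List String) : pvATrim ls = ls.take (pvBEnd ls ls.length) := by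
  induction ls using List.reverseRecOn with
  | nil => rw [pvATrim.eq_def]; simp [pvBEnd]
  | append_singleton ys y ih =>
    have hg : (ys ++ [y]).getD ((ys ++ [y]).length - 1) "" = y := by
      simp [List.getD]
    by_cases hb : PySem.Str.strip y == ""
    · rw [pvATrim.eq_def]
      rw [dif_pos ⟨by simp, by rw [hg]; exact hb⟩]
      rw [List.dropLast_concat, ih]
      have hlen : (ys ++ [y]).length = ys.length + 1 := by simp
      rw [hlen, pvBEnd]
      have hg2 : (ys ++ [y]).getD ys.length "" = y := by
        simp [List.getD]
      rw [hg2, if_pos hb, pvBEnd_append ys y ys.length (Nat.le_refl _)]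
      rw [List.take_append_of_le_length (pvBEnd_le ys ys.length)]
    · rw [pvATrim.eq_def]
      rw [dif_neg (by rw [hg]; simp [hb])]
      have hlen : (ys ++ [y]).length = ys.length + 1 := by simp
      rw [hlen, pvBEnd]
      have hg2 : (ys ++ [y]).getD ys.length "" = y := by
        simp [List.getD]
      rw [hg2, if_neg (by simp [hb])]
      rw [← hlen, List.take_length]

-- ===== VERDICT (by name: the statement is the Claim_ definition above) =====
theorem parse_commit_message_spec : Claim_equal_parse_commit_message := by
  intro text _
  unfold Spec_parse_commit_message parse_commit_message parse_commit_message_alt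
  rw [pvALoop_eq, pvATrim_eq]
  simp
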